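-- pv_equiv track=rewrite | github.com/ronggong/jingjuPhoneticSegmentationHMM | transProbaParallelLRHelper.py | indexIdenticalStringHelper
-- ===== SOURCE A (Python) =====
-- def indexIdenticalStringHelper(baseString,toSearchString):
--     '''
--     find index of toSearchString in baseString
--     :param baseString:
--     :param toSearchString:
--     :return:
--     '''
--     if len(baseString) < len(toSearchString):
--         return []
--     else:
--         indexIdentical = []
--         for ii in range(len(baseString)-len(toSearchString)+1):
--             if baseString[ii:ii+len(toSearchString)] == toSearchString:
--                 if len(toSearchString) == 3:
--                     indexIdentical += range(ii,ii+len(toSearchString))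
--                 else:
--                     indexIdentical += range(ii,ii+len(toSearchString)-1)
--
--         indexIdentical_unique = []
--         if len(indexIdentical):
--             for idxIden in indexIdentical:
--                 if idxIden not in indexIdentical_unique:
--                     indexIdentical_unique.append(idxIden)
--         return indexIdentical_unique
-- ===== SOURCE B (Python) =====
-- def indexIdenticalStringHelper(baseString, toSearchString):
--     # one pass: merge the covered intervals with a watermark instead of
--     # concatenating ranges and deduplicating quadratically
--     m = len(toSearchString)
--     span = m if m == 3 else m - 1
--     out = []
--     nxt = 0
--     for ii in range(len(baseString) - m + 1):
--         if baseString.startswith(toSearchString, ii):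
--             out.extend(range(max(ii, nxt), ii + span))
--             nxt = max(nxt, ii + span)
--     return out
-- ===== Notes on version B (the rewrite author's own statement) =====
-- stated objective: faster
-- what changed: B replaces A's concatenate-every-match-range-then-quadratic-membership-dedup with a single left-to-right pass that merges the covered intervals using a watermark of the last covered index, so the dedup scan disappears.
import Mathlib
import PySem

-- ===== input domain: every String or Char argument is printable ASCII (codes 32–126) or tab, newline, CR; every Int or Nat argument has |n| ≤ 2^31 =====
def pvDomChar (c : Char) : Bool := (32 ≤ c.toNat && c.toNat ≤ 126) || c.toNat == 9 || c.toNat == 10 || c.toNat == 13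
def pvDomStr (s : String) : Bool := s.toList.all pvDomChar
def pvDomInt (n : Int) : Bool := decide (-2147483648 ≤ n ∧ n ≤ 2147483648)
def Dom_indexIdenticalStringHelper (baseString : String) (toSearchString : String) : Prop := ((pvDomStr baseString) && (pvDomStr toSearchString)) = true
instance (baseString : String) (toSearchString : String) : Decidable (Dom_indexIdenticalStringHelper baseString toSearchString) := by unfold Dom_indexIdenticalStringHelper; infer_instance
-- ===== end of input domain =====

-- B replaces A's concatenate-all-ranges-then-quadratic-dedup with a single interval-merge
-- pass keeping a watermark of the last covered index (objective: faster dedup mechanism).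


-- ===== PORT A =====
def indexIdenticalStringHelper (baseString : String) (toSearchString : String) : List Int :=
  let b := baseString.toList
  let t := toSearchString.toList
  if b.length < t.length then []
  else
    let indexIdentical :=
      (PySem.List.pyRange 0 ((b.length : Int) - (t.length : Int) + 1) 1).foldl
        (fun acc ii =>
          if PySem.List.slice b (some ii) (some (ii + (t.length : Int))) = t then
            if t.length = 3 then acc ++ PySem.List.pyRange ii (ii + (t.length : Int)) 1
            else acc ++ PySem.List.pyRange ii (ii + (t.length : Int) - 1) 1
          else acc) []
    if indexIdentical.length ≠ 0 then
      indexIdentical.foldl (fun u x => if x ∈ u then u else u ++ [x]) []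
    else indexIdentical

-- ===== PORT B =====
def indexIdenticalStringHelper_alt (baseString : String) (toSearchString : String) : List Int :=
  let b := baseString.toList
  let t := toSearchString.toList
  let span : Int := if t.length = 3 then (t.length : Int) else (t.length : Int) - 1
  -- baseString.startswith(toSearchString, ii) ported by hand as isPrefixOf after drop;
  -- exact for the 0 ≤ ii ≤ len(b) this loop produces
  ((PySem.List.pyRange 0 ((b.length : Int) - (t.length : Int) + 1) 1).foldl
      (fun (st : List Int × Int) ii =>
        if t.isPrefixOf (List.drop ii.toNat b) then
          (st.1 ++ PySem.List.pyRange (max ii st.2) (ii + span) 1, max st.2 (ii + span))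
        else st) ([], 0)).1

-- ===== PRECONDITION & SPEC =====
def Spec_indexIdenticalStringHelper (baseString : String) (toSearchString : String) (out : List Int) : Prop := out = indexIdenticalStringHelper_alt baseString toSearchString
instance (baseString : String) (toSearchString : String) (out : List Int) : Decidable (Spec_indexIdenticalStringHelper baseString toSearchString out) := by unfold Spec_indexIdenticalStringHelper; infer_instance

-- ===== CLAIM (what is proved, stated in full; the proofs are below) =====
def Claim_equal_indexIdenticalStringHelper : Prop := ∀ (baseString : String) (toSearchString : String), Dom_indexIdenticalStringHelper baseString toSearchString → Spec_indexIdenticalStringHelper baseString toSearchString (indexIdenticalStringHelper baseString toSearchString)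

-- ===== LEMMAS AND PROOFS =====

-- Python's first-occurrence dedup loop over a duplicate-free block appends exactly the fresh elements.
lemma dedupFold_nodup (r : List Int) (hr : r.Nodup) :
    ∀ (u : List Int), r.foldl (fun acc x => if x ∈ acc then acc else acc ++ [x]) u
      = u ++ r.filter (fun x => decide (x ∉ u)) := by
  induction r with
  | nil => intro u; simp
  | cons x r ih =>
    intro u
    rcases List.nodup_cons.mp hr with ⟨hx, hr'⟩
    by_cases hmem : x ∈ u
    · simp only [List.foldl_cons, if_pos hmem, List.filter_cons, decide_eq_true_eq]
      rw [ih hr' u]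
      simp [hmem]
    · simp only [List.foldl_cons, if_neg hmem, List.filter_cons]
      rw [ih hr' (u ++ [x])]
      have : r.filter (fun y => decide (y ∉ u ++ [x])) = r.filter (fun y => decide (y ∉ u)) := by
        apply List.filter_congr
        intro y hy
        have hxy : y ≠ x := fun h => hx (h ▸ hy)
        simp [List.mem_append, hxy]
      rw [this]
      simp [hmem]

-- filtering a unit-step range by (c ≤ ·) just raises its lower end
lemma filter_ge_pyRange (a b c : Int) :
    (PySem.List.pyRange a b 1).filter (fun x => decide (c ≤ x)) = PySem.List.pyRange (max a c) b 1 := by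
  by_cases hab : b ≤ a
  · rw [PySem.List.pyRange_one_eq_nil hab, PySem.List.pyRange_one_eq_nil (le_trans hab (le_max_left _ _))]
    rfl
  · rw [not_le] at hab
    rw [PySem.List.pyRange_one_cons hab]
    by_cases hca : c ≤ a
    · rw [max_eq_left hca, PySem.List.pyRange_one_cons hab]
      simp only [List.filter_cons, decide_eq_true_eq, if_pos hca]
      have := filter_ge_pyRange (a + 1) b c
      rw [this, max_eq_left (by omega)]
    · simp only [List.filter_cons, decide_eq_true_eq, if_neg hca]
      have := filter_ge_pyRange (a + 1) b c
      rw [this]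
      congr 1
      omega
termination_by (b - a).toNat
decreasing_by all_goals omega

-- nothing is appended when the covered span is empty
lemma merge_fold_nil (span : Int) (hsp : span ≤ 0) :
    ∀ (Q : List Int) (st : List Int × Int),
      (Q.foldl (fun (st : List Int × Int) q =>
          (st.1 ++ PySem.List.pyRange (max q st.2) (q + span) 1, max st.2 (q + span))) st).1 = st.1 := by
  intro Q
  induction Q with
  | nil => intro st; rfl
  | cons q Q ih =>
    intro st
    simp only [List.foldl_cons]
    rw [PySem.List.pyRange_one_eq_nil (by have := le_max_left q st.2; omega)]
    rw [ih]
    simp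

-- MAIN: first-occurrence dedup of the concatenated ranges = one-pass interval merge
lemma merge_main (span : Int) :
    ∀ (Q : List Int) (u : List Int) (nxt : Int),
      Q.Pairwise (· < ·) →
      (∀ q ∈ Q, 0 ≤ q ∧ nxt - span < q) →
      (∀ x ∈ u, x < nxt) →
      (∀ x : Int, 0 ≤ x → nxt - span ≤ x → x < nxt → x ∈ u) →
      (Q.flatMap (fun q => PySem.List.pyRange q (q + span) 1)).foldl
          (fun acc x => if x ∈ acc then acc else acc ++ [x]) u
        = (Q.foldl (fun (st : List Int × Int) q =>
            (st.1 ++ PySem.List.pyRange (max q st.2) (q + span) 1, max st.2 (q + span))) (u, nxt)).1 := by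
  intro Q
  induction Q with
  | nil => intro u nxt _ _ _ _; rfl
  | cons q Q ih =>
    intro u nxt hpw hq hu hseg
    rcases List.pairwise_cons.mp hpw with ⟨hlt, hpw'⟩
    obtain ⟨hq0, hqn⟩ := hq q (List.mem_cons_self ..)
    simp only [List.flatMap_cons, List.foldl_append, List.foldl_cons]
    rw [dedupFold_nodup _ (PySem.List.nodup_pyRange_one _ _) u]
    have hfilt : (PySem.List.pyRange q (q + span) 1).filter (fun x => decide (x ∉ u))
        = PySem.List.pyRange (max q nxt) (q + span) 1 := by
      rw [← filter_ge_pyRange q (q + span) nxt]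
      apply List.filter_congr
      intro x hx
      rw [PySem.List.mem_pyRange_one] at hx
      simp only [decide_eq_decide]
      constructor
      · intro hnot
        by_contra hlt'
        rw [not_le] at hlt'
        exact hnot (hseg x (by omega) (by omega) hlt')
      · intro hle hmem
        exact absurd (hu x hmem) (by omega)
    rw [hfilt]
    have hnxt' : max nxt (q + span) = q + span := max_eq_right (by omega)
    rw [hnxt']
    rw [ih (u ++ PySem.List.pyRange (max q nxt) (q + span) 1) (q + span) hpw'
      (fun q' hq' => ⟨(hq q' (List.mem_cons_of_mem _ hq')).1,
        by have := List.rel_of_pairwise_cons hpw hq'; omega⟩)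
      (fun x hx => by
        rcases List.mem_append.mp hx with h | h
        · have := hu x h; omega
        · exact (PySem.List.mem_pyRange_one.mp h).2)
      (fun x hx0 hxlo hxhi => by
        by_cases hxn : nxt ≤ x
        · exact List.mem_append.mpr (Or.inr (PySem.List.mem_pyRange_one.mpr ⟨by omega, hxhi⟩))
        · exact List.mem_append.mpr (Or.inl (hseg x hx0 (by omega) (by omega)))) ]

-- ===== VERDICT (by name: the statement is the Claim_ definition above) =====
theorem indexIdenticalStringHelper_spec : Claim_equal_indexIdenticalStringHelper := by
  intro bs ts _
  unfold Spec_indexIdenticalStringHelper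
  simp only [indexIdenticalStringHelper, indexIdenticalStringHelper_alt]
  set b := bs.toList with hb
  set t := ts.toList with ht
  set m := t.length with hm
  set span : Int := if m = 3 then (m : Int) else (m : Int) - 1 with hspan
  set p : Int → Bool := fun ii => t.isPrefixOf (List.drop ii.toNat b) with hp
  set PS := PySem.List.pyRange 0 ((b.length : Int) - (m : Int) + 1) 1 with hPS
  -- B normalized: fold the merge step over the matching positions only
  have hB : ((PS.foldl
      (fun (st : List Int × Int) ii =>
        if t.isPrefixOf (List.drop ii.toNat b) then
          (st.1 ++ PySem.List.pyRange (max ii st.2) (ii + span) 1, max st.2 (ii + span))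
        else st) ([], 0))).1
      = ((PS.filter p).foldl
        (fun (st : List Int × Int) q =>
          (st.1 ++ PySem.List.pyRange (max q st.2) (q + span) 1, max st.2 (q + span))) ([], 0)).1 := by
    rw [PySem.List.foldl_if_eq_foldl_filter]
  rw [hB]
  by_cases hnm : b.length < t.length
  · rw [if_pos hnm]
    have hnil : PS = [] := PySem.List.pyRange_one_eq_nil (by omega)
    rw [hnil]
    rfl
  · rw [if_neg hnm]
    -- A's inner fold builds the concatenation of the covered ranges of the matches
    have hA : PS.foldl
        (fun acc ii =>
          if PySem.List.slice b (some ii) (some (ii + (m : Int))) = t then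
            if m = 3 then acc ++ PySem.List.pyRange ii (ii + (m : Int)) 1
            else acc ++ PySem.List.pyRange ii (ii + (m : Int) - 1) 1
          else acc) []
        = (PS.filter p).flatMap (fun q => PySem.List.pyRange q (q + span) 1) := by
      have hcongr : PS.foldl
          (fun acc ii =>
            if PySem.List.slice b (some ii) (some (ii + (m : Int))) = t then
              if m = 3 then acc ++ PySem.List.pyRange ii (ii + (m : Int)) 1
              else acc ++ PySem.List.pyRange ii (ii + (m : Int) - 1) 1
            else acc) []
          = PS.foldl (fun acc ii => if p ii then acc ++ PySem.List.pyRange ii (ii + span) 1 else acc) [] := by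
        apply PySem.List.foldl_congr_mem
        intro acc ii hii
        have hii0 : 0 ≤ ii := (PySem.List.mem_pyRange_one.mp (hPS ▸ hii)).1
        have hcond : (PySem.List.slice b (some ii) (some (ii + (m : Int))) = t) ↔ p ii = true := by
          rw [hp]
          rw [PySem.List.slice_toNat b hii0 (by omega)]
          have h1 : (ii + (m : Int)).toNat - ii.toNat = m := by omega
          rw [h1, List.isPrefixOf_iff_prefix, List.prefix_iff_eq_take, ← hm, eq_comm]
        by_cases hc : p ii = true
        · rw [if_pos (hcond.mpr hc), if_pos hc]
          by_cases h3 : m = 3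
          · have hsp' : ii + span = ii + (m : Int) := by rw [hspan, if_pos h3]
            rw [hsp', if_pos h3]
          · have hsp' : ii + span = ii + (m : Int) - 1 := by rw [hspan, if_neg h3]; ring
            rw [hsp', if_neg h3]
        · rw [if_neg (fun h => hc (hcond.mp h)), if_neg hc]
      rw [hcongr, PySem.List.foldl_if_eq_foldl_filter, PySem.List.foldl_append_eq_flatMap]
      simp
    rw [hA]
    set Q := PS.filter p with hQ
    -- A's guard-then-dedup equals the dedup fold outright
    have hguard : ∀ L : List Int,
        (if L.length ≠ 0 then L.foldl (fun u x => if x ∈ u then u else u ++ [x]) [] else L)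
          = L.foldl (fun u x => if x ∈ u then u else u ++ [x]) [] := by
      intro L
      by_cases hL : L = []
      · subst hL; simp
      · rw [if_pos (by simpa using hL)]
    rw [hguard]
    have hQpw : Q.Pairwise (· < ·) := (hPS ▸ PySem.List.pairwise_lt_pyRange_one 0 _).filter p
    have hQmem : ∀ q ∈ Q, 0 ≤ q := fun q hq =>
      (PySem.List.mem_pyRange_one.mp (hPS ▸ List.mem_of_mem_filter hq)).1
    by_cases hsp : 1 ≤ span
    · exact merge_main span Q [] 0 hQpw
        (fun q hq => ⟨hQmem q hq, by have := hQmem q hq; omega⟩)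
        (by simp) (fun x hx0 _ hx1 => absurd hx1 (not_lt.mpr hx0))
    · rw [not_le] at hsp
      have hflat : Q.flatMap (fun q => PySem.List.pyRange q (q + span) 1) = [] := by
        apply List.flatMap_eq_nil_iff.mpr
        intro q _
        exact PySem.List.pyRange_one_eq_nil (by omega)
      rw [hflat, merge_fold_nil span (by omega) Q ([], 0)]
      rfl
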